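-- pv_equiv track=rewrite | github.com/Morkchoklad/VsCode-Workspace | Sudoku solver/Main.py | sum_col
-- ===== SOURCE A (Python) =====
-- def sum_col(list):
--     col1,col2,col3 = sum_strings(list[0:9:3]), sum_strings(list[1:9:3]), sum_strings(list[2:9:3])
--     columns = [col1,col2,col3]
--     columns_dict = {col1:[0,3,6], col2:[1,4,7], col3: [2,5,8]}
--     columns_non_null = [x for x in columns if x != 0]
--     if len(columns_non_null) == 1 and columns_non_null[0] >= 2:
--         return columns_dict[columns_non_null[0]]
--     else:
--         return None
--
-- def sum_strings(list):
--     sum = 0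
--     for n in list:
--         sum += int(n)
--     return sum
-- ===== SOURCE B (Python) =====
-- def sum_col(list):
--     # single pass: bucket each of the first nine entries into its column sum by index mod 3
--     sums = [0, 0, 0]
--     for i, x in enumerate(list[:9]):
--         sums[i % 3] += int(x)
--     # first nonzero column decides: it must be >= 2 and the other two zero
--     for j in range(3):
--         if sums[j] != 0:
--             if sums[j] >= 2 and sums[(j + 1) % 3] == 0 and sums[(j + 2) % 3] == 0:
--                 return [j, j + 3, j + 6]
--             return None
--     return None
-- ===== Notes on version B (the rewrite author's own statement) =====
-- stated objective: alternative
-- what changed: B replaces A's three strided slice passes plus a sum-value-keyed dict inverted back to an index group by a single bucketing pass over enumerate(list[:9]) (sums[i % 3] += int(x)) followed by a scan that decides on the first nonzero bucket.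
import Mathlib
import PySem

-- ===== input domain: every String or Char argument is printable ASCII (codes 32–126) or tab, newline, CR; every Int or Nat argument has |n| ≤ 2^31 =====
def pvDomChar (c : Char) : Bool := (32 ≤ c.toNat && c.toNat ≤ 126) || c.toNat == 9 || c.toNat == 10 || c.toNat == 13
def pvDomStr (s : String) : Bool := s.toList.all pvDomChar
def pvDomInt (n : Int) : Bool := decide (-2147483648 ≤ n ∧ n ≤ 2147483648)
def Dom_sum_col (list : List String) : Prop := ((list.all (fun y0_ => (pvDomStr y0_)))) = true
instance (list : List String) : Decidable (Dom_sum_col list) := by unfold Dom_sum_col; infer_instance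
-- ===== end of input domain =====

-- B makes a single bucketing pass over the first nine entries (index mod 3) and decides on the
-- first nonzero bucket, instead of A's three strided slice sums inverted through a value-keyed dict.
-- Equivalence of return values is proved on inputs where every used entry parses as an int.

-- ===== PORT A =====
-- int(n) raises ValueError on a non-integer string: Pre_ excludes those inputs, so '.getD 0' is never the value used inside Pre_.
def sumStrings (l : List String) : Int :=
  l.foldl (fun sum n => sum + (PySem.Int.ofStr? n).getD 0) 0

def sum_col (list : List String) : Option (List Int) :=
  let col1 := sumStrings ((PySem.List.slice? list (some 0) (some 9) 3).getD [])
  let col2 := sumStrings ((PySem.List.slice? list (some 1) (some 9) 3).getD [])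
  let col3 := sumStrings ((PySem.List.slice? list (some 2) (some 9) 3).getD [])
  let columns := [col1, col2, col3]
  let columns_dict := ((PySem.Dict.empty.insert col1 ([0, 3, 6] : List Int)).insert col2 [1, 4, 7]).insert col3 [2, 5, 8]
  let columns_non_null := columns.filter (fun x => x ≠ 0)
  if columns_non_null.length = 1 ∧ columns_non_null.headD 0 ≥ 2 then
    columns_dict.get? (columns_non_null.headD 0)
  else
    none

-- ===== PORT B =====
-- phase 1 of Source B: one pass over enumerate(list[:9]), adding each entry into its bucket (index mod 3)
def pvSums (list : List String) : Int × Int × Int :=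
  (PySem.List.enumerate (PySem.List.slice list none (some 9)) 0).foldl
    (fun (s : Int × Int × Int) p =>
      let v := (PySem.Int.ofStr? p.2).getD 0
      if PySem.Int.mod p.1 3 = 0 then (s.1 + v, s.2.1, s.2.2)
      else if PySem.Int.mod p.1 3 = 1 then (s.1, s.2.1 + v, s.2.2)
      else (s.1, s.2.1, s.2.2 + v))
    (0, 0, 0)

-- phase 2 of Source B: the j-loop (j = 0,1,2 unrolled): first nonzero bucket decides
def pvDecB (s : Int × Int × Int) : Option (List Int) :=
  if s.1 ≠ 0 then
    (if s.1 ≥ 2 ∧ s.2.1 = 0 ∧ s.2.2 = 0 then some [0, 3, 6] else none)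
  else if s.2.1 ≠ 0 then
    (if s.2.1 ≥ 2 ∧ s.2.2 = 0 ∧ s.1 = 0 then some [1, 4, 7] else none)
  else if s.2.2 ≠ 0 then
    (if s.2.2 ≥ 2 ∧ s.1 = 0 ∧ s.2.1 = 0 then some [2, 5, 8] else none)
  else none

def sum_col_alt (list : List String) : Option (List Int) :=
  pvDecB (pvSums list)

-- ===== PRECONDITION & SPEC =====
-- Pre_ excludes exactly the inputs where Python's int() raises ValueError: some entry among the
-- first nine strings does not parse as an integer.
def Pre_sum_col (list : List String) : Prop :=
  ∀ s ∈ list.take 9, (PySem.Int.ofStr? s).isSome = true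
instance (list : List String) : Decidable (Pre_sum_col list) := by unfold Pre_sum_col; infer_instance

def pvWitness_sum_col : List String := ["661", "1350", " -55  ", "-18618", "26", " +84", "+3656"]

def Spec_sum_col (list : List String) (out : Option (List Int)) : Prop := out = sum_col_alt list
instance (list : List String) (out : Option (List Int)) : Decidable (Spec_sum_col list out) := by unfold Spec_sum_col; infer_instance

-- ===== CLAIM (what is proved, stated in full; the proofs are below) =====
def Claim_equal_sum_col : Prop := ∀ (list : List String), Dom_sum_col list → Pre_sum_col list → Spec_sum_col list (sum_col list)

-- ===== LEMMAS AND PROOFS =====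

-- A's decision stage as a function of the three column sums (mirrors sum_col's body literally,
-- so 'sum_col l' is definitionally 'pvDecA col1 col2 col3'); proof-only helper.
def pvDecA (a b c : Int) : Option (List Int) :=
  let columns := [a, b, c]
  let columns_dict := ((PySem.Dict.empty.insert a ([0, 3, 6] : List Int)).insert b [1, 4, 7]).insert c [2, 5, 8]
  let columns_non_null := columns.filter (fun x => x ≠ 0)
  if columns_non_null.length = 1 ∧ columns_non_null.headD 0 ≥ 2 then
    columns_dict.get? (columns_non_null.headD 0)
  else
    none

-- the two decision stages agree on any three sums: 8-way case split
theorem dec_eq (a b c : Int) : pvDecA a b c = pvDecB (a, b, c) := by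
  by_cases ha : a = 0 <;> by_cases hb : b = 0 <;> by_cases hc : c = 0 <;>
    simp [pvDecA, pvDecB, ha, hb, hc,
          PySem.Dict.insert, PySem.Dict.empty, PySem.Dict.get?, List.filter] <;>
    split_ifs <;> simp_all

-- B's single bucketing pass computes exactly A's three strided slice sums
theorem sums_eq (l : List String) :
    pvSums l =
      (sumStrings ((PySem.List.slice? l (some 0) (some 9) 3).getD []),
       sumStrings ((PySem.List.slice? l (some 1) (some 9) 3).getD []),
       sumStrings ((PySem.List.slice? l (some 2) (some 9) 3).getD [])) := by
  match l with
  | [] | [x0] | [x0,x1] | [x0,x1,x2] | [x0,x1,x2,x3] | [x0,x1,x2,x3,x4]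
  | [x0,x1,x2,x3,x4,x5] | [x0,x1,x2,x3,x4,x5,x6] | [x0,x1,x2,x3,x4,x5,x6,x7] =>
    simp [pvSums, sumStrings, PySem.List.slice?, PySem.List.sliceIndices,
          PySem.List.slice, PySem.List.clampIdx, PySem.List.enumerate,
          PySem.Int.mod, List.filterMap,
          show List.range 1 = [0] from rfl, show List.range 2 = [0, 1] from rfl,
          show List.range 3 = [0, 1, 2] from rfl]
  | x0 :: x1 :: x2 :: x3 :: x4 :: x5 :: x6 :: x7 :: x8 :: rest =>
    have h0 : min 0 ((rest.length:Int) + 1 + 1 + 1 + 1 + 1 + 1 + 1 + 1 + 1) = 0 := by omega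
    have h1 : min 1 ((rest.length:Int) + 1 + 1 + 1 + 1 + 1 + 1 + 1 + 1 + 1) = 1 := by omega
    have h2 : min 2 ((rest.length:Int) + 1 + 1 + 1 + 1 + 1 + 1 + 1 + 1 + 1) = 2 := by omega
    have h9 : min 9 ((rest.length:Int) + 1 + 1 + 1 + 1 + 1 + 1 + 1 + 1 + 1) = 9 := by omega
    simp [pvSums, sumStrings, PySem.List.slice?, PySem.List.sliceIndices,
          PySem.List.slice, PySem.List.clampIdx, PySem.List.enumerate,
          PySem.Int.mod, List.filterMap, h0, h1, h2, h9,
          show List.range 3 = [0, 1, 2] from rfl]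

-- ===== VERDICT (by name: the statement is the Claim_ definition above) =====
theorem sum_col_spec : Claim_equal_sum_col := by
  intro l _ _
  show sum_col l = sum_col_alt l
  show pvDecA _ _ _ = pvDecB (pvSums l)
  rw [sums_eq]
  exact dec_eq _ _ _
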